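-- pv_equiv track=rewrite | github.com/hdrwilkinson/advent-of-code-2023 | day3/main.py | add_numbers_to_gears
-- ===== SOURCE A (Python) =====
-- def add_numbers_to_gears(data, gears, boundaries):
--     """
--     Adds numbers from the data to the corresponding gears based on their proximity to special characters.
--
--     Args:
--     data (list of str): A list of strings, each representing a line of data.
--     gears (dict): A dictionary of gears identified in the data.
--     boundaries (dict): A dictionary of boundaries around gears.
--
--     Returns:
--     dict: The updated gears dictionary with numbers added to each gear.
--     """
--     # Iterating through each line
--     for row, line in enumerate(data):
--         # Setting empty string for number
--         number = ''
--         # List to hold row number positions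
--         number_positions = []
--         # Bool for checking if number set to false initially
--         is_number = False
--         # Iterating through each character
--         for column, character in enumerate(line):
--             # If character is a number
--             if character.isdigit():
--                 # Setting bool to true
--                 is_number = True
--                 # Increment number string
--                 number += character
--                 # Add position to number_poistions
--                 number_positions.append((row, column))
--             # If not a number, but has last character was a number, then we have the end of a number string
--             elif is_number:
--                 used_gears = []
--                 # Looping over number positions
--                 for position in number_positions:
--                     # If the position is near a special character
--                     if position in boundaries:
--                         # Add number to gear position list
--                         gear_ids = boundaries[position]
--                         # Loop through gear IDs stores in boundaries at this position
--                         for gear_id in gear_ids: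
--                             # If gear_id not already used
--                             if gear_id not in used_gears:
--                                 # Add number to gear
--                                 gears[gear_id].append(int(number))
--                             # Add gear_id to used gears
--                             used_gears.append(gear_id)
--                 # Resetting
--                 is_number = False
--                 number = ''
--                 number_positions = []
--     return gears
-- ===== SOURCE B (Python) =====
-- def add_numbers_to_gears(data, gears, boundaries):
--     # Pass 1: collect number segments, closing a run only when a non-digit
--     # follows it (a run reaching the end of a line is not emitted).
--     segments = []
--     for row, line in enumerate(data):
--         num = ''
--         positions = []
--         for col, ch in enumerate(line):
--             if ch.isdigit():
--                 num += ch
--                 positions.append((row, col))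
--             else:
--                 if num:
--                     segments.append((num, positions))
--                 num = ''
--                 positions = []
--     # Pass 2: for each segment, gather its ordered-distinct adjacent gear ids
--     # and append the number once to each such gear's list.
--     for num, positions in segments:
--         ids = list(dict.fromkeys(
--             gid for p in positions for gid in boundaries.get(p, [])))
--         n = int(num)
--         for gid in ids:
--             gears[gid].append(n)
--     return gears
-- ===== Notes on version B (the rewrite author's own statement) =====
-- stated objective: alternative
-- what changed: A assigns numbers to gears inline while scanning (flushing each digit run with a used_gears list the moment a non-digit follows it); B is a two-pass decomposition: it first parses all lines into a list of number segments (number string, positions), then in a second pass assigns each segment by gathering its ordered-distinct adjacent gear ids via dict.fromkeys and appending the number once per gear.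
import Mathlib
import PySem

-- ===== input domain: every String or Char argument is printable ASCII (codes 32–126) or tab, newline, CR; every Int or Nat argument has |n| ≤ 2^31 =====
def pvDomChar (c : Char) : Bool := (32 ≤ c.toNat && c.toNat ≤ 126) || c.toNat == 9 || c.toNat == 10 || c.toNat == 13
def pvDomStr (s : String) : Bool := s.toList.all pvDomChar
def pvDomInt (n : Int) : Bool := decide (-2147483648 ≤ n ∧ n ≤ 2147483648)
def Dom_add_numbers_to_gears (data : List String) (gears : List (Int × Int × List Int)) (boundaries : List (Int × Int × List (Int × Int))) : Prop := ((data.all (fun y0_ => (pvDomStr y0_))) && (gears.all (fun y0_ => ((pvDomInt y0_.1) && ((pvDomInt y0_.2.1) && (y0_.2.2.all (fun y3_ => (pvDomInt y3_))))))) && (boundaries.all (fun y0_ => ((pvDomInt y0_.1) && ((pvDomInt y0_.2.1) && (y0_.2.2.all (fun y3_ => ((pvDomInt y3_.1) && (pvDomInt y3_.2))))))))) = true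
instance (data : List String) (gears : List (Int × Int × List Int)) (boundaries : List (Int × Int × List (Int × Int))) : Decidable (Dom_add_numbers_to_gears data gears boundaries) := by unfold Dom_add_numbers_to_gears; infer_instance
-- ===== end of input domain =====

-- B re-implements A by a two-pass decomposition (parse all number segments first, then assign
-- each segment to its adjacent gears); same return value, same in-place-update semantics on the
-- gears dict (the equivalence proved is about the returned dict's contents).

-- ===== PORT A =====
-- A's flush of a finished number: loop over its positions, then over the gear ids stored in
-- boundaries there, appending int(number) to each gear not already used.
def pvFlushA (bd : PySem.Dict (Int × Int) (List (Int × Int))) (number : List Char)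
    (positions : List (Int × Int)) (g : PySem.Dict (Int × Int) (List Int)) :
    PySem.Dict (Int × Int) (List Int) :=
  (positions.foldl
    (fun (ug : List (Int × Int) × PySem.Dict (Int × Int) (List Int)) position =>
      match bd.get? position with
      | none => ug
      | some gear_ids =>
        gear_ids.foldl
          (fun ug gear_id =>
            (ug.1 ++ [gear_id],
             if ug.1.contains gear_id then ug.2
             else
               match ug.2.get? gear_id with
               | some l => ug.2.insert gear_id (l ++ [(PySem.Int.ofChars? number).getD 0])
               | none => ug.2))  -- none: Python raises KeyError here; excluded by Pre_
          ug)
    ([], g)).2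

-- one step of A's inner character loop; state = (number, number_positions, is_number, gears)
def pvStepA (bd : PySem.Dict (Int × Int) (List (Int × Int))) (row : Int)
    (st : List Char × List (Int × Int) × Bool × PySem.Dict (Int × Int) (List Int))
    (cc : Int × Char) :
    List Char × List (Int × Int) × Bool × PySem.Dict (Int × Int) (List Int) :=
  if PySem.Chars.isdigit cc.2 then
    (st.1 ++ [cc.2], st.2.1 ++ [(row, cc.1)], true, st.2.2.2)
  else if st.2.2.1 then
    ([], [], false, pvFlushA bd st.1 st.2.1 st.2.2.2)
  else st

def pvLineA (bd : PySem.Dict (Int × Int) (List (Int × Int))) (row : Int) (line : String)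
    (g : PySem.Dict (Int × Int) (List Int)) : PySem.Dict (Int × Int) (List Int) :=
  ((PySem.List.enumerate line.toList 0).foldl (pvStepA bd row) ([], [], false, g)).2.2.2

def add_numbers_to_gears (data : List String) (gears : List (Int × Int × List Int)) (boundaries : List (Int × Int × List (Int × Int))) : List (Int × Int × List Int) :=
  let bd : PySem.Dict (Int × Int) (List (Int × Int)) :=
    PySem.Dict.ofList (boundaries.map (fun t => ((t.1, t.2.1), t.2.2)))
  let g0 : PySem.Dict (Int × Int) (List Int) :=
    PySem.Dict.ofList (gears.map (fun t => ((t.1, t.2.1), t.2.2)))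
  let gFinal := (PySem.List.enumerate data 0).foldl (fun g rl => pvLineA bd rl.1 rl.2 g) g0
  gFinal.items.map (fun p => (p.1.1, p.1.2, p.2))

-- ===== PORT B =====
-- one step of B's segment scanner; state = (segments, current digits, current positions);
-- a run is closed only when a non-digit follows it (a run at end of line is dropped).
def pvStepSegB (row : Int)
    (st : List (List Char × List (Int × Int)) × List Char × List (Int × Int))
    (cc : Int × Char) :
    List (List Char × List (Int × Int)) × List Char × List (Int × Int) :=
  if PySem.Chars.isdigit cc.2 then
    (st.1, st.2.1 ++ [cc.2], st.2.2 ++ [(row, cc.1)])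
  else
    ((if st.2.1.isEmpty then st.1 else st.1 ++ [(st.2.1, st.2.2)]), [], [])

def pvSegsB (row : Int) (line : String) : List (List Char × List (Int × Int)) :=
  ((PySem.List.enumerate line.toList 0).foldl (pvStepSegB row) ([], [], [])).1

-- B's assignment of one segment: ordered-distinct adjacent gear ids, then one append each
def pvApplySegB (bd : PySem.Dict (Int × Int) (List (Int × Int)))
    (g : PySem.Dict (Int × Int) (List Int)) (seg : List Char × List (Int × Int)) :
    PySem.Dict (Int × Int) (List Int) :=
  let ids := PySem.List.dedup (seg.2.flatMap (fun p => bd.getD p []))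
  let n := (PySem.Int.ofChars? seg.1).getD 0
  ids.foldl
    (fun g gid =>
      match g.get? gid with
      | some l => g.insert gid (l ++ [n])
      | none => g)  -- none: Python raises KeyError here; excluded by Pre_
    g

def add_numbers_to_gears_alt (data : List String) (gears : List (Int × Int × List Int)) (boundaries : List (Int × Int × List (Int × Int))) : List (Int × Int × List Int) :=
  let bd : PySem.Dict (Int × Int) (List (Int × Int)) :=
    PySem.Dict.ofList (boundaries.map (fun t => ((t.1, t.2.1), t.2.2)))
  let g0 : PySem.Dict (Int × Int) (List Int) :=
    PySem.Dict.ofList (gears.map (fun t => ((t.1, t.2.1), t.2.2)))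
  let segments := (PySem.List.enumerate data 0).foldl (fun acc rl => acc ++ pvSegsB rl.1 rl.2) []
  let gFinal := segments.foldl (pvApplySegB bd) g0
  gFinal.items.map (fun p => (p.1.1, p.1.2, p.2))

-- ===== PRECONDITION & SPEC =====
-- Pre_ excludes exactly the inputs on which Python A raises KeyError: some digit position that
-- belongs to a completed number run (a non-digit follows it in its row) has a boundaries entry
-- listing a gear id that is not a key of gears.
def Pre_add_numbers_to_gears (data : List String) (gears : List (Int × Int × List Int)) (boundaries : List (Int × Int × List (Int × Int))) : Prop :=
  ∀ rl ∈ PySem.List.enumerate data 0, ∀ cc ∈ PySem.List.enumerate rl.2.toList 0,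
    PySem.Chars.isdigit cc.2 = true →
    (∃ cc2 ∈ PySem.List.enumerate rl.2.toList 0,
        cc.1 < cc2.1 ∧ PySem.Chars.isdigit cc2.2 = false) →
    ∀ gid ∈ (PySem.Dict.ofList
        (boundaries.map (fun t => ((t.1, t.2.1), t.2.2)))).getD (rl.1, cc.1) [],
      gid ∈ gears.map (fun u => (u.1, u.2.1))
instance (data : List String) (gears : List (Int × Int × List Int)) (boundaries : List (Int × Int × List (Int × Int))) : Decidable (Pre_add_numbers_to_gears data gears boundaries) := by unfold Pre_add_numbers_to_gears; infer_instance

def pvWitness_add_numbers_to_gears : List String × (List (Int × Int × List Int)) × (List (Int × Int × List (Int × Int))) :=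
  (["12*", ".3."], [(0, 3, []), (1, 1, [7])], [(0, 1, [(0, 3)]), (1, 1, [(0, 3), (1, 1)])])

def Spec_add_numbers_to_gears (data : List String) (gears : List (Int × Int × List Int)) (boundaries : List (Int × Int × List (Int × Int))) (out : List (Int × Int × List Int)) : Prop := out = add_numbers_to_gears_alt data gears boundaries
instance (data : List String) (gears : List (Int × Int × List Int)) (boundaries : List (Int × Int × List (Int × Int))) (out : List (Int × Int × List Int)) : Decidable (Spec_add_numbers_to_gears data gears boundaries out) := by unfold Spec_add_numbers_to_gears; infer_instance

-- ===== CLAIM (what is proved, stated in full; the proofs are below) =====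
def Claim_equal_add_numbers_to_gears : Prop := ∀ (data : List String) (gears : List (Int × Int × List Int)) (boundaries : List (Int × Int × List (Int × Int))), Dom_add_numbers_to_gears data gears boundaries → Pre_add_numbers_to_gears data gears boundaries → Spec_add_numbers_to_gears data gears boundaries (add_numbers_to_gears data gears boundaries)

-- ===== LEMMAS AND PROOFS =====

-- B's per-gear append, as a named function (pvApplySegB's inner step)
def pvAppB (n : Int) (g : PySem.Dict (Int × Int) (List Int)) (gid : Int × Int) :
    PySem.Dict (Int × Int) (List Int) :=
  match g.get? gid with
  | some l => g.insert gid (l ++ [n])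
  | none => g

-- A's per-gear step carrying the used_gears list
def pvAppA (n : Int) (ug : List (Int × Int) × PySem.Dict (Int × Int) (List Int))
    (gid : Int × Int) : List (Int × Int) × PySem.Dict (Int × Int) (List Int) :=
  (ug.1 ++ [gid], if ug.1.contains gid then ug.2 else pvAppB n ug.2 gid)

theorem pvFlushA_eq_flat (bd : PySem.Dict (Int × Int) (List (Int × Int))) (number : List Char)
    (positions : List (Int × Int)) (s : List (Int × Int) × PySem.Dict (Int × Int) (List Int)) :
    positions.foldl
      (fun (ug : List (Int × Int) × PySem.Dict (Int × Int) (List Int)) position =>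
        match bd.get? position with
        | none => ug
        | some gear_ids =>
          gear_ids.foldl
            (fun ug gear_id =>
              (ug.1 ++ [gear_id],
               if ug.1.contains gear_id then ug.2
               else
                 match ug.2.get? gear_id with
                 | some l => ug.2.insert gear_id (l ++ [(PySem.Int.ofChars? number).getD 0])
                 | none => ug.2))
            ug)
      s
    = (positions.flatMap (fun p => bd.getD p [])).foldl
        (pvAppA ((PySem.Int.ofChars? number).getD 0)) s := by
  induction positions generalizing s with
  | nil => simp
  | cons p ps ih =>
    simp only [List.foldl_cons, List.flatMap_cons, List.foldl_append, ih]
    congr 1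
    rw [PySem.Dict.getD_eq_get?_getD]
    cases h : bd.get? p with
    | none => simp
    | some gids =>
      simp only [Option.getD_some]
      rfl

theorem pvFoldA_eq_dedup (n : Int) (L : List (Int × Int)) (used : List (Int × Int))
    (g : PySem.Dict (Int × Int) (List Int)) :
    (L.foldl (pvAppA n) (used, g)).2
      = ((PySem.Set.ofList L).filter (fun y => !(used.contains y))).foldl (pvAppB n) g := by
  induction L generalizing used g with
  | nil => simp [PySem.Set.ofList]
  | cons x xs ih =>
    simp only [List.foldl_cons, PySem.Set.ofList_cons]
    have hfilter : (PySem.Set.discard (PySem.Set.ofList xs) x).filter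
          (fun y => !(used.contains y))
        = (PySem.Set.ofList xs).filter (fun y => !((used ++ [x]).contains y)) := by
      show ((PySem.Set.ofList xs).filter (fun y => !(y == x))).filter
            (fun y => !(used.contains y))
          = (PySem.Set.ofList xs).filter (fun y => !((used ++ [x]).contains y))
      rw [List.filter_filter]
      apply List.filter_congr
      intro y _
      by_cases hxy : y = x <;> simp [Bool.not_or, Bool.and_comm, hxy]
    by_cases hx : x ∈ used
    · have : pvAppA n (used, g) x = (used ++ [x], g) := by simp [pvAppA, hx]
      rw [this, ih]
      rw [List.filter_cons_of_neg (by simp [hx]), hfilter]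
    · have : pvAppA n (used, g) x = (used ++ [x], pvAppB n g x) := by
        simp [pvAppA, hx]
      rw [this, ih]
      rw [List.filter_cons_of_pos (by simp [hx]), hfilter, List.foldl_cons]

-- A's flush of one finished number equals B's per-segment assignment
theorem pvFlushA_eq_applySeg (bd : PySem.Dict (Int × Int) (List (Int × Int)))
    (number : List Char) (positions : List (Int × Int))
    (g : PySem.Dict (Int × Int) (List Int)) :
    pvFlushA bd number positions g = pvApplySegB bd g (number, positions) := by
  unfold pvFlushA pvApplySegB
  rw [pvFlushA_eq_flat, pvFoldA_eq_dedup]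
  simp only [PySem.List.dedup_eq_ofList]
  congr 1
  simp

-- B's segment scanner: the already-collected segments are only appended to
theorem pvSegsB_acc (row : Int) (cs : List (Int × Char))
    (acc : List (List Char × List (Int × Int))) (cur : List Char)
    (cpos : List (Int × Int)) :
    cs.foldl (pvStepSegB row) (acc, cur, cpos)
      = (acc ++ (cs.foldl (pvStepSegB row) ([], cur, cpos)).1,
         (cs.foldl (pvStepSegB row) ([], cur, cpos)).2) := by
  induction cs generalizing acc cur cpos with
  | nil => simp
  | cons c cs ih =>
    simp only [List.foldl_cons]
    by_cases hd : PySem.Chars.isdigit c.2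
    · simp only [pvStepSegB, hd, if_pos]
      rw [ih, ih [] (cur ++ [c.2])]
    · simp only [pvStepSegB, hd, if_false, Bool.false_eq_true]
      by_cases he : cur.isEmpty
      · simp only [he, if_true]
        rw [ih]
      · simp only [he, Bool.false_eq_true, reduceIte]
        rw [ih, ih ([] ++ [(cur, cpos)])]
        simp

-- the scanning invariant: A's inline-flush scan = fold of B's segments
theorem pvScan_eq (bd : PySem.Dict (Int × Int) (List (Int × Int))) (row : Int)
    (cs : List (Int × Char)) (cur : List Char) (cpos : List (Int × Int))
    (g : PySem.Dict (Int × Int) (List Int)) (h : cur = [] → cpos = []) :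
    (cs.foldl (pvStepA bd row) (cur, cpos, !cur.isEmpty, g)).2.2.2
      = ((cs.foldl (pvStepSegB row) ([], cur, cpos)).1).foldl (pvApplySegB bd) g := by
  induction cs generalizing cur cpos g with
  | nil => simp
  | cons c cs ih =>
    simp only [List.foldl_cons]
    by_cases hd : PySem.Chars.isdigit c.2
    · have hA : pvStepA bd row (cur, cpos, !cur.isEmpty, g) c
          = (cur ++ [c.2], cpos ++ [(row, c.1)], true, g) := by
        simp [pvStepA, hd]
      have hB : pvStepSegB row ([], cur, cpos) c
          = ([], cur ++ [c.2], cpos ++ [(row, c.1)]) := by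
        simp [pvStepSegB, hd]
      rw [hA, hB]
      have : (true : Bool) = !(cur ++ [c.2]).isEmpty := by simp
      rw [this, ih (cur ++ [c.2]) (cpos ++ [(row, c.1)]) g (by simp)]
    · by_cases he : cur = []
      · subst he
        have hcpos := h rfl; subst hcpos
        have hA : pvStepA bd row (([] : List Char), ([] : List (Int × Int)),
              !(List.isEmpty ([] : List Char)), g) c = ([], [], false, g) := by
          simp [pvStepA, hd]
        have hB : pvStepSegB row (([] : List (List Char × List (Int × Int))), [], []) c
            = ([], [], []) := by
          simp [pvStepSegB, hd]
        rw [hA, hB]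
        have : (false : Bool) = !(List.isEmpty ([] : List Char)) := by simp
        rw [this, ih [] [] g (fun _ => rfl)]
      · have hA : pvStepA bd row (cur, cpos, !cur.isEmpty, g) c
            = ([], [], false, pvFlushA bd cur cpos g) := by
          simp [pvStepA, hd, he]
        have hB : pvStepSegB row ([], cur, cpos) c = ([(cur, cpos)], [], []) := by
          simp [pvStepSegB, hd, he]
        rw [hA, hB, pvSegsB_acc]
        have : (false : Bool) = !(List.isEmpty ([] : List Char)) := by simp
        rw [this, ih [] [] (pvFlushA bd cur cpos g) (fun _ => rfl)]
        simp [pvFlushA_eq_applySeg]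

theorem pvLineA_eq_segs (bd : PySem.Dict (Int × Int) (List (Int × Int))) (row : Int)
    (line : String) (g : PySem.Dict (Int × Int) (List Int)) :
    pvLineA bd row line g = (pvSegsB row line).foldl (pvApplySegB bd) g := by
  unfold pvLineA pvSegsB
  have : (false : Bool) = !(List.isEmpty ([] : List Char)) := by simp
  rw [this, pvScan_eq bd row _ [] [] g (fun _ => rfl)]

-- ===== VERDICT (by name: the statement is the Claim_ definition above) =====
theorem add_numbers_to_gears_spec : Claim_equal_add_numbers_to_gears := by
  intro data gears boundaries _ _
  unfold Spec_add_numbers_to_gears add_numbers_to_gears add_numbers_to_gears_alt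
  simp only
  congr 1
  rw [PySem.List.foldl_append_eq_flatMap, List.nil_append, List.foldl_flatMap]
  have hfun : (fun (g : PySem.Dict (Int × Int) (List Int)) (rl : Int × String) =>
      pvLineA (PySem.Dict.ofList (boundaries.map (fun t => ((t.1, t.2.1), t.2.2)))) rl.1 rl.2 g)
      = fun g rl => (pvSegsB rl.1 rl.2).foldl
          (pvApplySegB (PySem.Dict.ofList (boundaries.map (fun t => ((t.1, t.2.1), t.2.2))))) g :=
    funext fun g => funext fun rl => pvLineA_eq_segs _ rl.1 rl.2 g
  rw [hfun]
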